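-- pv_equiv track=rewrite | github.com/hilo-mpc/hilo-mpc | hilo_mpc/plugins/matplotlib/plot.py | _get_layout
-- ===== SOURCE A (Python) =====
-- from math import ceil
--
-- def _get_layout(n_plots, layout=None, layout_type='grid'):
--     """
--
--     :param n_plots:
--     :param layout:
--     :param layout_type:
--     :return:
--     """
--     if layout is not None:
--         if not isinstance(layout, (list, tuple)) or len(layout) != 2:
--             raise ValueError("Layout must be a tuple of (rows, columns)")
--
--         n_rows, n_cols = layout
--
--         def ceil_(x):
--             """
--
--             :param x:
--             :return:
--             """
--             return int(ceil(x))
--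
--         if n_rows == -1 and n_cols > 0:
--             layout = n_rows, n_cols = (ceil_(float(n_plots) / n_cols), n_cols)
--         elif n_cols == -1 and n_rows > 0:
--             layout = n_rows, n_cols = (n_rows, ceil_(float(n_plots) / n_rows))
--         elif n_cols <= 0 and n_rows <= 0:
--             msg = "At least one dimension of layout must be positive"
--             raise ValueError(msg)
--
--         if n_rows * n_cols < n_plots:
--             raise ValueError(f"Layout of {n_rows}x{n_cols} must be larger than required size {n_plots}")
--
--         return layout
--
--     if layout_type == 'single':
--         return 1, 1
--     if layout_type == 'horizontal':
--         return 1, n_plots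
--     if layout_type == 'vertical':
--         return n_plots, 1
--
--     layouts = {1: (1, 1), 2: (1, 2), 3: (2, 2), 4: (2, 2)}
--     try:
--         return layouts[n_plots]
--     except KeyError:
--         k = 1
--         while k ** 2 < n_plots:
--             k += 1
--
--         if (k - 1) * k >= n_plots:
--             return (k - 1), k
--         else:
--             return k, k
-- ===== SOURCE B (Python) =====
-- from math import isqrt
--
-- def _get_layout(n_plots, layout=None, layout_type='grid'):
--     if layout is not None:
--         n_rows, n_cols = layout
--         if n_rows == -1 and n_cols > 0:
--             n_rows = -(-n_plots // n_cols)          # exact integer ceiling division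
--         elif n_cols == -1 and n_rows > 0:
--             n_cols = -(-n_plots // n_rows)
--         elif n_rows <= 0 and n_cols <= 0:
--             raise ValueError("At least one dimension of layout must be positive")
--         if n_rows * n_cols < n_plots:
--             raise ValueError(f"Layout of {n_rows}x{n_cols} must be larger than required size {n_plots}")
--         return n_rows, n_cols
--
--     if layout_type == 'single':
--         return 1, 1
--     if layout_type == 'horizontal':
--         return 1, n_plots
--     if layout_type == 'vertical':
--         return n_plots, 1
--
--     # smallest k with k*k >= n_plots, in closed form (no dict, no search loop)
--     k = isqrt(max(n_plots - 1, 0)) + 1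
--     if (k - 1) * k >= n_plots:
--         return (k - 1), k
--     return k, k
-- ===== Notes on version B (the rewrite author's own statement) =====
-- stated objective: simpler
-- what changed: The {1,2,3,4} layout dict and the incrementing `while k**2 < n_plots` search are replaced by one closed-form k = isqrt(max(n_plots-1,0)) + 1 (the dict entries coincide with the closed form), and the float ceil() in the fixed-dimension branch by exact integer ceiling division.
import Mathlib
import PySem

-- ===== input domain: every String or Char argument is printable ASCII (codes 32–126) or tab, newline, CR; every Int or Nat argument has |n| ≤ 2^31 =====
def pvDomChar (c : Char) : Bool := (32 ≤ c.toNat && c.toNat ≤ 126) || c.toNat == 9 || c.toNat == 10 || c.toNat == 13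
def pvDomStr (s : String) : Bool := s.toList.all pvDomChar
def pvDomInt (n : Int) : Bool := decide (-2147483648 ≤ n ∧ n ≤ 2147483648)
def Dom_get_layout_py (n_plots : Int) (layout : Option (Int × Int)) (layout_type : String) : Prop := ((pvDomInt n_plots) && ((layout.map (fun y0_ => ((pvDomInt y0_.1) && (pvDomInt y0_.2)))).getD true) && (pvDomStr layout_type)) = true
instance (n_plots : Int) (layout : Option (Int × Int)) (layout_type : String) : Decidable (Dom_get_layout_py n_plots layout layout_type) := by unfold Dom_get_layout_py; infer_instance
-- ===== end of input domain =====

-- B replaces A's {1,2,3,4} layout dict and incremental `while k**2 < n_plots` search with one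
-- closed-form k = isqrt(max(n_plots-1,0)) + 1 (objective: simpler/idiomatic; same tie-break).

-- ===== PORT A =====
-- int(ceil(float(n)/c)) for ints: exact integer ceiling division on the stated domain
-- (|ints| ≤ 2^31, where the double division cannot round across an integer)
def ceilA (n c : Int) : Int := -(PySem.Int.floordiv (-n) c)

-- `k = 1; while k ** 2 < n_plots: k += 1`
def pyWhileK (n k : Int) (hk : 0 < k) : Int :=
  if h : k * k < n then pyWhileK n (k + 1) (by omega) else k
termination_by (n - k * k).toNat
decreasing_by
  have hkk : k * k < (k + 1) * (k + 1) := by nlinarith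
  omega

def get_layout_py (n_plots : Int) (layout : Option (Int × Int)) (layout_type : String) : Int × Int :=
  match layout with
  | some (n_rows, n_cols) =>
    -- the two `raise ValueError` paths of this branch lie outside Pre_; (0, 0) is a junk value there
    if n_rows = -1 ∧ 0 < n_cols then
      let r := ceilA n_plots n_cols
      if r * n_cols < n_plots then (0, 0) else (r, n_cols)
    else if n_cols = -1 ∧ 0 < n_rows then
      let c := ceilA n_plots n_rows
      if n_rows * c < n_plots then (0, 0) else (n_rows, c)
    else if n_cols ≤ 0 ∧ n_rows ≤ 0 then (0, 0)
    else if n_rows * n_cols < n_plots then (0, 0)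
    else (n_rows, n_cols)
  | none =>
    if layout_type = "single" then (1, 1)
    else if layout_type = "horizontal" then (1, n_plots)
    else if layout_type = "vertical" then (n_plots, 1)
    else
      -- layouts = {1:(1,1), 2:(1,2), 3:(2,2), 4:(2,2)}; layouts[n_plots] ported as a
      -- first-match chain over the (distinct) keys, KeyError branch = final else (exact)
      if n_plots = 1 then (1, 1)
      else if n_plots = 2 then (1, 2)
      else if n_plots = 3 then (2, 2)
      else if n_plots = 4 then (2, 2)
      else
        let k := pyWhileK n_plots 1 (by omega)
        if (k - 1) * k ≥ n_plots then (k - 1, k) else (k, k)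

-- ===== PORT B =====
def get_layout_py_alt (n_plots : Int) (layout : Option (Int × Int)) (layout_type : String) : Int × Int :=
  match layout with
  | some (rc : Int × Int) =>
    let n_rows := rc.1
    let n_cols := rc.2
    -- -(-n_plots // d): B's integer ceiling division
    let (n_rows, n_cols) :=
      if n_rows = -1 ∧ 0 < n_cols then (-(PySem.Int.floordiv (-n_plots) n_cols), n_cols)
      else if n_cols = -1 ∧ 0 < n_rows then (n_rows, -(PySem.Int.floordiv (-n_plots) n_rows))
      else (n_rows, n_cols)
    -- both `raise ValueError` paths lie outside Pre_; (0, 0) is a junk value there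
    if ¬ (rc.1 = -1 ∧ 0 < rc.2) ∧ ¬ (rc.2 = -1 ∧ 0 < rc.1) ∧ rc.1 ≤ 0 ∧ rc.2 ≤ 0 then (0, 0)
    else if n_rows * n_cols < n_plots then (0, 0)
    else (n_rows, n_cols)
  | none =>
    if layout_type = "single" then (1, 1)
    else if layout_type = "horizontal" then (1, n_plots)
    else if layout_type = "vertical" then (n_plots, 1)
    else
      -- k = isqrt(max(n_plots - 1, 0)) + 1
      let k : Int := (Nat.sqrt (max (n_plots - 1) 0).toNat : Int) + 1
      if (k - 1) * k ≥ n_plots then (k - 1, k) else (k, k)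

-- ===== PRECONDITION & SPEC =====
-- Pre_ excludes exactly the inputs where A raises ValueError: a layout with both dimensions
-- non-positive (outside the two -1 auto-fill cases), or a layout whose area is below n_plots.
def Pre_get_layout_py (n_plots : Int) (layout : Option (Int × Int)) (layout_type : String) : Prop :=
  (layout.map (fun rc =>
    decide ((rc.1 = -1 ∧ 0 < rc.2) ∨ (rc.2 = -1 ∧ 0 < rc.1) ∨
            (¬ (rc.1 ≤ 0 ∧ rc.2 ≤ 0) ∧ n_plots ≤ rc.1 * rc.2)))).getD true = true
instance (n_plots : Int) (layout : Option (Int × Int)) (layout_type : String) : Decidable (Pre_get_layout_py n_plots layout layout_type) := by unfold Pre_get_layout_py; infer_instance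

def pvWitness_get_layout_py : Int × (Option (Int × Int)) × String := (5, none, "grid")

def Spec_get_layout_py (n_plots : Int) (layout : Option (Int × Int)) (layout_type : String) (out : Int × Int) : Prop := out = get_layout_py_alt n_plots layout layout_type
instance (n_plots : Int) (layout : Option (Int × Int)) (layout_type : String) (out : Int × Int) : Decidable (Spec_get_layout_py n_plots layout layout_type out) := by unfold Spec_get_layout_py; infer_instance

-- ===== CLAIM (what is proved, stated in full; the proofs are below) =====
def Claim_equal_get_layout_py : Prop := ∀ (n_plots : Int) (layout : Option (Int × Int)) (layout_type : String), Dom_get_layout_py n_plots layout layout_type → Pre_get_layout_py n_plots layout layout_type → Spec_get_layout_py n_plots layout layout_type (get_layout_py n_plots layout layout_type)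

-- ===== LEMMAS AND PROOFS =====

lemma pyWhileK_eq_of (n m : Int) (hm : ¬ m * m < n) :
    ∀ d (k : Int) (hk : 0 < k), (m - k).toNat = d → k ≤ m →
      (∀ j, k ≤ j → j < m → j * j < n) → pyWhileK n k hk = m := by
  intro d
  induction d with
  | zero =>
    intro k hk hd hkm hlt
    have : m = k := by omega
    subst this
    unfold pyWhileK
    simp [hm]
  | succ d ih =>
    intro k hk hd hkm hlt
    have hkm' : k < m := by omega
    have hc : k * k < n := hlt k le_rfl hkm'
    unfold pyWhileK
    rw [dif_pos hc]
    exact ih (k + 1) (by omega) (by omega) (by omega) (fun j h1 h2 => hlt j (by omega) h2)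

lemma pyWhileK_one (n : Int) (hk : (0 : Int) < 1) :
    pyWhileK n 1 hk = (Nat.sqrt (max (n - 1) 0).toNat : Int) + 1 := by
  set N : Nat := (max (n - 1) 0).toNat with hN
  have hNn : (N : Int) = max (n - 1) 0 := by
    rw [hN]; exact Int.toNat_of_nonneg (le_max_right _ _)
  have hm : ¬ ((Nat.sqrt N : Int) + 1) * ((Nat.sqrt N : Int) + 1) < n := by
    have h1 : N < (Nat.sqrt N + 1) * (Nat.sqrt N + 1) := Nat.lt_succ_sqrt N
    have h2 : (N : Int) < ((Nat.sqrt N + 1) * (Nat.sqrt N + 1) : Nat) := by exact_mod_cast h1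
    push_cast at h2 ⊢
    omega
  refine pyWhileK_eq_of n _ hm _ 1 hk rfl ?_ ?_
  · omega
  · intro j hj1 hj2
    have hjN : j.toNat ≤ Nat.sqrt N := by omega
    have h1 : j.toNat * j.toNat ≤ Nat.sqrt N * Nat.sqrt N := Nat.mul_le_mul hjN hjN
    have h2 : Nat.sqrt N * Nat.sqrt N ≤ N := by simpa [pow_two] using Nat.sqrt_le' N
    have h3 : (j.toNat : Int) = j := Int.toNat_of_nonneg (by omega)
    have h4 : ((j.toNat * j.toNat : Nat) : Int) ≤ (N : Int) := by exact_mod_cast le_trans h1 h2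
    push_cast at h4
    rw [h3] at h4
    -- need N ≥ 1 here (a j with 1 ≤ j ≤ sqrt N exists), so max (n-1) 0 = n - 1
    have hs : 1 ≤ Nat.sqrt N := by omega
    have hN1 : 1 ≤ N := by
      rcases Nat.eq_zero_or_pos N with h0 | h0
      · rw [h0] at hs; simp at hs
      · exact h0
    omega

-- ===== VERDICT (by name: the statement is the Claim_ definition above) =====
theorem get_layout_py_spec : Claim_equal_get_layout_py := by
  intro n layout lt _ hpre
  unfold Spec_get_layout_py
  match layout with
  | some (r, c) =>
    unfold Pre_get_layout_py at hpre
    simp only [Option.map_some, Option.getD_some, decide_eq_true_eq] at hpre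
    unfold get_layout_py get_layout_py_alt ceilA
    by_cases h1 : r = -1 ∧ 0 < c
    · simp only [h1]
      simp
    · by_cases h2 : c = -1 ∧ 0 < r
      · simp [h2]
      · have h3 : ¬ (r ≤ 0 ∧ c ≤ 0) ∧ n ≤ r * c := by tauto
        have h4 : ¬ (c ≤ 0 ∧ r ≤ 0) := by tauto
        have h5 : ¬ (r * c < n) := by omega
        simp [h1, h2, h3.1, h4, h5]
  | none =>
    unfold get_layout_py get_layout_py_alt
    by_cases hs : lt = "single"
    · simp [hs]
    by_cases hh : lt = "horizontal"
    · simp [hh]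
    by_cases hv : lt = "vertical"
    · simp [hv]
    simp only [hs, hh, hv, if_false]
    by_cases e1 : n = 1
    · subst e1; rw [pyWhileK_one]; norm_num
    by_cases e2 : n = 2
    · subst e2; rw [pyWhileK_one]; norm_num
    by_cases e3 : n = 3
    · subst e3; rw [pyWhileK_one]; rw [show ((max ((3:Int) - 1) 0).toNat.sqrt) = 1 from by rw [show (max ((3:Int) - 1) 0).toNat = 2 by rfl]; norm_num]; norm_num
    by_cases e4 : n = 4
    · subst e4; rw [pyWhileK_one]; rw [show ((max ((4:Int) - 1) 0).toNat.sqrt) = 1 from by rw [show (max ((4:Int) - 1) 0).toNat = 3 by rfl]; norm_num]; norm_num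
    simp only [e1, e2, e3, e4, if_false]
    rw [pyWhileK_one]
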